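-- pv_equiv track=rewrite | github.com/woshuizhaol/NaSet | sequence_identity.py | get_representative_seqs
-- ===== SOURCE A (Python) =====
-- def is_nucleic_sequence(seq):
--     nucleic_chars = {'A', 'T', 'C', 'G', 'U'}
--     seq_upper = seq.upper()
--     for char in seq_upper:
--         if char not in nucleic_chars:
--             return False
--     return True
--
-- def get_representative_seqs(chains):
--     protein_seqs = []
--     nucleic_seqs = []
--     for header, seq in chains:
--         if is_nucleic_sequence(seq):
--             nucleic_seqs.append(seq)
--         else:
--             protein_seqs.append(seq)
--     rep_protein = max(protein_seqs, key=len) if protein_seqs else None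
--     rep_nucleic = max(nucleic_seqs, key=len) if nucleic_seqs else None
--     return rep_protein, rep_nucleic
-- ===== SOURCE B (Python) =====
-- def is_nucleic_sequence(seq):
--     nucleic_chars = {'A', 'T', 'C', 'G', 'U'}
--     seq_upper = seq.upper()
--     for char in seq_upper:
--         if char not in nucleic_chars:
--             return False
--     return True
--
-- def get_representative_seqs(chains):
--     # single pass: keep the current longest protein / nucleic sequence;
--     # strict > keeps the first one on a length tie (like max(key=len))
--     rep_protein = None
--     rep_nucleic = None
--     for header, seq in chains:
--         if is_nucleic_sequence(seq):
--             if rep_nucleic is None or len(seq) > len(rep_nucleic):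
--                 rep_nucleic = seq
--         else:
--             if rep_protein is None or len(seq) > len(rep_protein):
--                 rep_protein = seq
--     return rep_protein, rep_nucleic
-- ===== Notes on version B (the rewrite author's own statement) =====
-- stated objective: simpler
-- what changed: Replaced the two intermediate partition lists plus two max(key=len) scans by a single pass that keeps only the current longest protein and nucleic sequence (strict > preserves first-wins tie-breaking).
import Mathlib
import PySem

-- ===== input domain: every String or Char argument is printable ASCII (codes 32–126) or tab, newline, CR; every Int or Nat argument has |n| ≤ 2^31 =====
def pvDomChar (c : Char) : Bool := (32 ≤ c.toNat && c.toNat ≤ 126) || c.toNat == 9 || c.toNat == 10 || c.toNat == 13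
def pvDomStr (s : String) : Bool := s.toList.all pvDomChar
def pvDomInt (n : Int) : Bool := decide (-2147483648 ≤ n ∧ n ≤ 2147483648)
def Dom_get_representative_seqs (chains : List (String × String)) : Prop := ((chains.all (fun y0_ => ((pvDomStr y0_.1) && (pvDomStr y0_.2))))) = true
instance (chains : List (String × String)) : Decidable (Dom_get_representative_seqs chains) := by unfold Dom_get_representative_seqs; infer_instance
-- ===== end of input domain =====

-- B replaces A's two partition lists + two max(key=len) scans by one pass keeping only
-- the current longest protein/nucleic sequence (simpler, O(1) extra space; return value only).

-- ===== PORT A =====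
-- shared helper (identical in Source A and Source B): is_nucleic_sequence
def pvNucleicLoop : List Char → Bool
  | [] => true
  | c :: rest => if !(c = 'A' ∨ c = 'T' ∨ c = 'C' ∨ c = 'G' ∨ c = 'U') then false
                 else pvNucleicLoop rest

def is_nucleic_sequence (seq : String) : Bool :=
  pvNucleicLoop (PySem.Str.upper seq).toList

-- max(seqs, key=len) if seqs else None  (Python max keeps the FIRST maximal element)
def pyMaxLen : List String → Option String
  | [] => none
  | x :: xs => some (xs.foldl (fun b s => if PySem.Str.len s > PySem.Str.len b then s else b) x)

def get_representative_seqs (chains : List (String × String)) : Option String × Option String :=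
  let acc := chains.foldl
    (fun (acc : List String × List String) hs =>
      if is_nucleic_sequence hs.2 then (acc.1, acc.2 ++ [hs.2])
      else (acc.1 ++ [hs.2], acc.2))
    ([], [])
  (pyMaxLen acc.1, pyMaxLen acc.2)

-- ===== PORT B =====
def get_representative_seqs_alt (chains : List (String × String)) : Option String × Option String :=
  chains.foldl
    (fun (acc : Option String × Option String) hs =>
      if is_nucleic_sequence hs.2 then
        match acc.2 with
        | none => (acc.1, some hs.2)
        | some b => if PySem.Str.len hs.2 > PySem.Str.len b then (acc.1, some hs.2) else acc
      else
        match acc.1 with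
        | none => (some hs.2, acc.2)
        | some b => if PySem.Str.len hs.2 > PySem.Str.len b then (some hs.2, acc.2) else acc)
    (none, none)

-- ===== PRECONDITION & SPEC =====
def Spec_get_representative_seqs (chains : List (String × String)) (out : Option String × Option String) : Prop := out = get_representative_seqs_alt chains
instance (chains : List (String × String)) (out : Option String × Option String) : Decidable (Spec_get_representative_seqs chains out) := by unfold Spec_get_representative_seqs; infer_instance

-- ===== CLAIM (what is proved, stated in full; the proofs are below) =====
def Claim_equal_get_representative_seqs : Prop := ∀ (chains : List (String × String)), Dom_get_representative_seqs chains → Spec_get_representative_seqs chains (get_representative_seqs chains)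

-- ===== LEMMAS AND PROOFS =====

-- "update current best with s" — what B does to one side of its state
def pvExtend (o : Option String) (s : String) : Option String :=
  match o with
  | none => some s
  | some b => if PySem.Str.len s > PySem.Str.len b then some s else some b

def pvStepB (acc : Option String × Option String) (hs : String × String) :
    Option String × Option String :=
  if is_nucleic_sequence hs.2 then
    match acc.2 with
    | none => (acc.1, some hs.2)
    | some b => if PySem.Str.len hs.2 > PySem.Str.len b then (acc.1, some hs.2) else acc
  else
    match acc.1 with
    | none => (some hs.2, acc.2)
    | some b => if PySem.Str.len hs.2 > PySem.Str.len b then (some hs.2, acc.2) else acc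

def pvStepA (acc : List String × List String) (hs : String × String) :
    List String × List String :=
  if is_nucleic_sequence hs.2 then (acc.1, acc.2 ++ [hs.2]) else (acc.1 ++ [hs.2], acc.2)

theorem pyMaxLen_append (l : List String) (s : String) :
    pyMaxLen (l ++ [s]) = pvExtend (pyMaxLen l) s := by
  cases l with
  | nil => simp [pyMaxLen, pvExtend]
  | cons x xs =>
    simp only [pyMaxLen, pvExtend, List.cons_append, List.foldl_append, List.foldl_cons,
      List.foldl_nil]
    split <;> rfl

theorem pvStepB_eq (acc : Option String × Option String) (hs : String × String) :
    pvStepB acc hs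
    = if is_nucleic_sequence hs.2 then (acc.1, pvExtend acc.2 hs.2)
      else (pvExtend acc.1 hs.2, acc.2) := by
  obtain ⟨p, n⟩ := acc
  by_cases h : is_nucleic_sequence hs.2
  · cases n with
    | none => simp [pvStepB, h, pvExtend]
    | some b => simp only [pvStepB, h, if_true, pvExtend]; split <;> rfl
  · cases p with
    | none => simp [pvStepB, h, pvExtend]
    | some b => simp only [pvStepB, h, if_false, pvExtend, Bool.false_eq_true]; split <;> rfl

theorem main_invariant (chains : List (String × String)) (p n : List String) :
    List.foldl pvStepB (pyMaxLen p, pyMaxLen n) chains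
    = (pyMaxLen (List.foldl pvStepA (p, n) chains).1,
       pyMaxLen (List.foldl pvStepA (p, n) chains).2) := by
  induction chains generalizing p n with
  | nil => simp
  | cons hs rest ih =>
    simp only [List.foldl_cons, pvStepB_eq, pvStepA]
    by_cases h : is_nucleic_sequence hs.2
    · simp only [h, if_true]
      rw [← pyMaxLen_append]
      exact ih p (n ++ [hs.2])
    · simp only [h, if_false, Bool.false_eq_true]
      rw [← pyMaxLen_append]
      exact ih (p ++ [hs.2]) n

-- ===== VERDICT (by name: the statement is the Claim_ definition above) =====
theorem get_representative_seqs_spec : Claim_equal_get_representative_seqs := by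
  intro chains _
  unfold Spec_get_representative_seqs get_representative_seqs get_representative_seqs_alt
  have h := main_invariant chains [] []
  simp only [pyMaxLen] at h
  exact h.symm
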